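-- pv_equiv track=rewrite | github.com/teaghan-playlab/eval-streamlit | eval_app/data_loader.py | order_csv_headers
-- ===== SOURCE A (Python) =====
-- from typing import Dict, List, Any, Optional
--
-- def order_csv_headers(headers: List[str]) -> List[str]:
--     """
--     Order CSV headers in a specific order:
--     1. Metadata (IDs, dates, message counts)
--     2. Evaluation fields (evaluation_*)
--     3. Starter inputs (custom fields from user-start)
--     4. Conversation text
--
--     Args:
--         headers: List of header names
--
--     Returns:
--         Ordered list of headers
--     """
--     # Define metadata fields in desired order (IDs, dates, counts)
--     # Separate chatbot model and evaluator model
--     metadata_order = [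
--         "appId",
--         "appName",
--         "conversationId",
--         "createdAt",
--         "endedAt",
--         "userId",
--         "chatbotModel",  # Chatbot model
--         "evaluatorModel",  # Evaluator model
--         "messageCount",
--         "userMessageCount",
--         "flaggedMessageCount",
--         "moderatedMessageCount",
--     ]
--
--     # Separate headers into categories
--     metadata = []
--     evaluation_metadata = []  # evaluation_config_file, evaluation_decode_failed, etc.
--     evaluation_fields = []  # evaluation_* fields that are actual evaluation results
--     starter_inputs = []
--     conversation_field = []
--     other_fields = []
--
--     # Known evaluation prefixes for actual evaluation results
--     evaluation_prefixes = ["evaluation_"]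
--
--     # Evaluation metadata fields (not actual evaluation results)
--     evaluation_metadata_fields = ["evaluation_config_file", "evaluation_decode_failed", "evaluation_error"]
--
--     # Known metadata fields
--     metadata_set = set(metadata_order)
--
--     for header in headers:
--         if header == "conversation":
--             conversation_field.append(header)
--         elif header in metadata_set:
--             metadata.append(header)
--         elif header in evaluation_metadata_fields:
--             evaluation_metadata.append(header)
--         elif any(header.startswith(prefix) for prefix in evaluation_prefixes):
--             evaluation_fields.append(header)
--         else:
--             # Assume it's a starter input (custom field from user-start message)
--             starter_inputs.append(header)
--
--     # Order metadata according to metadata_order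
--     ordered_metadata = [h for h in metadata_order if h in metadata]
--     # Add any metadata fields not in the predefined order
--     ordered_metadata.extend([h for h in metadata if h not in metadata_order])
--
--     # Sort evaluation metadata and evaluation fields
--     evaluation_metadata.sort()
--     evaluation_fields.sort()
--     starter_inputs.sort()
--
--     # Combine in desired order: metadata, evaluation_metadata, evaluation_fields, starter_inputs, conversation
--     ordered_headers = ordered_metadata + evaluation_metadata + evaluation_fields + starter_inputs + conversation_field + other_fields
--
--     return ordered_headers
-- ===== SOURCE B (Python) =====
-- METADATA_ORDER = [
--     "appId", "appName", "conversationId", "createdAt", "endedAt", "userId",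
--     "chatbotModel", "evaluatorModel", "messageCount", "userMessageCount",
--     "flaggedMessageCount", "moderatedMessageCount",
-- ]
-- EVALUATION_METADATA_FIELDS = ("evaluation_config_file", "evaluation_decode_failed", "evaluation_error")
-- METADATA_SET = set(METADATA_ORDER)
--
--
-- def _category(header):
--     """Category rank with the same precedence as the original if/elif chain."""
--     if header == "conversation":
--         return 4
--     if header in METADATA_SET:
--         return 0
--     if header in EVALUATION_METADATA_FIELDS:
--         return 1
--     if header.startswith("evaluation_"):
--         return 2
--     return 3
--
--
-- def order_csv_headers(headers):
--     return (
--         [m for m in METADATA_ORDER if m in headers]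
--         + sorted(h for h in headers if _category(h) == 1)
--         + sorted(h for h in headers if _category(h) == 2)
--         + sorted(h for h in headers if _category(h) == 3)
--         + [h for h in headers if h == "conversation"]
--     )
-- ===== Notes on version B (the rewrite author's own statement) =====
-- stated objective: simpler
-- what changed: Replaces the single-pass six-bucket partition plus reorder/sort/concat with one direct comprehension or sorted-filter pass per category, keyed by a small rank function with the same if/elif precedence.
import Mathlib
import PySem

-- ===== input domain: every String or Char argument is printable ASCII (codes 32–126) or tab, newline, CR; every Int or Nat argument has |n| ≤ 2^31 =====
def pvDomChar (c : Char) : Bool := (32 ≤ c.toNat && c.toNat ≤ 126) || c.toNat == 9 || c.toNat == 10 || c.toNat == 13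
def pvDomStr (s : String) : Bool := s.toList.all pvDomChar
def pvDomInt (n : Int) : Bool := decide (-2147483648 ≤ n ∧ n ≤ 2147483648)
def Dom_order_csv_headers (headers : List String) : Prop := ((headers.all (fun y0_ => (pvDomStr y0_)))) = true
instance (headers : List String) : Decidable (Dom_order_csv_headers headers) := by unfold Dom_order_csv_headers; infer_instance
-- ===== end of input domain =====

-- B replaces A's single-pass bucket partition (six accumulators, then reorder/sort/concat)
-- by one comprehension or sorted-filter pass per category; objective: simpler.

-- ===== PORT A =====
def pvMetaOrderA : List String :=
  ["appId", "appName", "conversationId", "createdAt", "endedAt", "userId",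
   "chatbotModel", "evaluatorModel", "messageCount", "userMessageCount",
   "flaggedMessageCount", "moderatedMessageCount"]

def pvEvalMetaFieldsA : List String :=
  ["evaluation_config_file", "evaluation_decode_failed", "evaluation_error"]

def pvEvalPrefixesA : List String := ["evaluation_"]

-- the body of A's 'for header in headers' loop: append to the matching bucket
def pvStepA (acc : List String × List String × List String × List String × List String)
    (h : String) : List String × List String × List String × List String × List String :=
  match acc with
  | (md, em, ef, si, cv) =>
    if h == "conversation" then (md, em, ef, si, cv ++ [h])
    else if PySem.Set.contains (PySem.Set.ofList pvMetaOrderA) h then (md ++ [h], em, ef, si, cv)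
    else if pvEvalMetaFieldsA.contains h then (md, em ++ [h], ef, si, cv)
    else if pvEvalPrefixesA.any (fun p => PySem.Str.startswith h p) then (md, em, ef ++ [h], si, cv)
    else (md, em, ef, si ++ [h], cv)

def order_csv_headers (headers : List String) : List String :=
  let st := headers.foldl pvStepA ([], [], [], [], [])
  let md := st.1
  let em := st.2.1
  let ef := st.2.2.1
  let si := st.2.2.2.1
  let cv := st.2.2.2.2
  let ordered_metadata :=
    (pvMetaOrderA.filter (fun h => md.contains h)) ++ (md.filter (fun h => !pvMetaOrderA.contains h))
  let other_fields : List String := []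
  ordered_metadata ++ PySem.List.sorted em (fun x => x) false
    ++ PySem.List.sorted ef (fun x => x) false
    ++ PySem.List.sorted si (fun x => x) false
    ++ cv ++ other_fields

-- ===== PORT B =====
def pvMetaOrderB : List String :=
  ["appId", "appName", "conversationId", "createdAt", "endedAt", "userId",
   "chatbotModel", "evaluatorModel", "messageCount", "userMessageCount",
   "flaggedMessageCount", "moderatedMessageCount"]

def pvEvalMetaFieldsB : List String :=
  ["evaluation_config_file", "evaluation_decode_failed", "evaluation_error"]

-- Source B's _category: rank with the same precedence as the original if/elif chain
def pvCategory (h : String) : Nat :=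
  if h == "conversation" then 4
  else if PySem.Set.contains (PySem.Set.ofList pvMetaOrderB) h then 0
  else if pvEvalMetaFieldsB.contains h then 1
  else if PySem.Str.startswith h "evaluation_" then 2
  else 3

def order_csv_headers_alt (headers : List String) : List String :=
  (pvMetaOrderB.filter (fun m => headers.contains m))
  ++ PySem.List.sorted (headers.filter (fun h => pvCategory h == 1)) (fun x => x) false
  ++ PySem.List.sorted (headers.filter (fun h => pvCategory h == 2)) (fun x => x) false
  ++ PySem.List.sorted (headers.filter (fun h => pvCategory h == 3)) (fun x => x) false
  ++ headers.filter (fun h => h == "conversation")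

-- ===== PRECONDITION & SPEC =====
def Spec_order_csv_headers (headers : List String) (out : List String) : Prop := out = order_csv_headers_alt headers
instance (headers : List String) (out : List String) : Decidable (Spec_order_csv_headers headers out) := by unfold Spec_order_csv_headers; infer_instance

-- ===== CLAIM (what is proved, stated in full; the proofs are below) =====
def Claim_equal_order_csv_headers : Prop := ∀ (headers : List String), Dom_order_csv_headers headers → Spec_order_csv_headers headers (order_csv_headers headers)

-- ===== LEMMAS AND PROOFS =====

-- A's loop partitions headers into the category filters (stated via B's rank function)
theorem pvFoldA_eq (hs : List String) (md em ef si cv : List String) :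
    hs.foldl pvStepA (md, em, ef, si, cv) =
      (md ++ hs.filter (fun h => pvCategory h == 0),
       em ++ hs.filter (fun h => pvCategory h == 1),
       ef ++ hs.filter (fun h => pvCategory h == 2),
       si ++ hs.filter (fun h => pvCategory h == 3),
       cv ++ hs.filter (fun h => h == "conversation")) := by
  induction hs generalizing md em ef si cv with
  | nil => simp
  | cons x xs ih =>
    have hany : pvEvalPrefixesA.any (fun p => PySem.Str.startswith x p)
        = PySem.Str.startswith x "evaluation_" := by
      simp [pvEvalPrefixesA]
    have hcat : pvCategory x =
        (if x == "conversation" then 4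
         else if PySem.Set.contains (PySem.Set.ofList pvMetaOrderA) x then 0
         else if pvEvalMetaFieldsA.contains x then 1
         else if PySem.Str.startswith x "evaluation_" then 2 else 3) := rfl
    simp only [List.foldl_cons, pvStepA, hany]
    split_ifs with h1 h2 h3 h4 <;>
      simp_all [List.filter_cons, List.append_assoc, ih]

theorem pvCat_metaOrder : ∀ m ∈ pvMetaOrderA, pvCategory m = 0 := by decide

theorem pvCat_zero_mem (h : String) (hc : pvCategory h = 0) : h ∈ pvMetaOrderA := by
  unfold pvCategory at hc
  split_ifs at hc with h1 h2 h3 h4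
  all_goals first
    | omega
    | (have h5 := (PySem.Set.contains_iff _ _).mp h2
       have hBA : pvMetaOrderB = pvMetaOrderA := rfl
       rw [hBA] at h5
       exact (PySem.Set.mem_ofList _ _).mp h5)

-- ===== VERDICT (by name: the statement is the Claim_ definition above) =====
theorem order_csv_headers_spec : Claim_equal_order_csv_headers := by
  intro headers _
  unfold Spec_order_csv_headers order_csv_headers order_csv_headers_alt
  simp only [pvFoldA_eq, List.nil_append]
  have h1 : pvMetaOrderA.filter
      (fun h => (headers.filter (fun h' => pvCategory h' == 0)).contains h)
      = pvMetaOrderB.filter (fun m => headers.contains m) := by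
    have : pvMetaOrderA = pvMetaOrderB := rfl
    rw [← this]
    apply List.filter_congr
    intro m hm
    have hc : pvCategory m = 0 := pvCat_metaOrder m hm
    simp [List.mem_filter, hc]
  have h2 : (headers.filter (fun h' => pvCategory h' == 0)).filter
      (fun h => !pvMetaOrderA.contains h) = [] := by
    rw [List.filter_eq_nil_iff]
    intro h hmem
    have hc : pvCategory h = 0 := by
      have := (List.mem_filter.mp hmem).2
      simpa using this
    simp [pvCat_zero_mem h hc]
  rw [h1, h2]
  simp
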